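-- pv_equiv track=rewrite | github.com/murMeowCode/service_assets | lottery_service/lot/services/password_service.py | check_sequences
-- ===== SOURCE A (Python) =====
-- def check_sequences(secret, user_input):
--     if secret == user_input:
--         return 1
--
--     if secret[:6] == user_input[:6]:
--         if secret[-1] != user_input[-1]:
--             return 2
--
--     if secret[:5] == user_input[:5]:
--         if secret[5:] != user_input[5:]:
--             return 3
--
--     # Проверка 2 подряд в любом месте
--     for i in range(len(secret)-1):
--         for j in range(len(user_input)-1):
--             if secret[0] == user_input[0]:
--                 if secret[-1] == user_input[-1]:
--                     return 4
--
--     return 0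
-- ===== SOURCE B (Python) =====
-- def check_sequences(secret, user_input):
--     n, m = len(secret), len(user_input)
--     # single scan: length of the common prefix
--     p = 0
--     while p < n and p < m and secret[p] == user_input[p]:
--         p += 1
--     if p == n and p == m:          # identical strings
--         return 1
--     ends_match = (secret[-1] == user_input[-1]) if (n > 0 and m > 0) else False
--     # secret[:k] == user_input[:k]  <=>  min(n,k) == min(m,k) and p >= min(n,k)
--     if min(n, 6) == min(m, 6) and min(n, 6) <= p and not ends_match:
--         return 2
--     if min(n, 5) == min(m, 5) and min(n, 5) <= p:
--         return 3
--     if n >= 2 and m >= 2 and p >= 1 and ends_match: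
--         return 4
--     return 0
-- ===== Notes on version B (the rewrite author's own statement) =====
-- stated objective: faster
-- what changed: B computes the common-prefix length p in one scan and classifies arithmetically: prefix-slice equality becomes a min/length comparison against p, the redundant tail test of the return-3 branch is subsumed by having already ruled out equality, and A's O(n*m) loop-invariant nested loop becomes the O(1) check lengths>=2, p>=1 and last chars equal.
import Mathlib
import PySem

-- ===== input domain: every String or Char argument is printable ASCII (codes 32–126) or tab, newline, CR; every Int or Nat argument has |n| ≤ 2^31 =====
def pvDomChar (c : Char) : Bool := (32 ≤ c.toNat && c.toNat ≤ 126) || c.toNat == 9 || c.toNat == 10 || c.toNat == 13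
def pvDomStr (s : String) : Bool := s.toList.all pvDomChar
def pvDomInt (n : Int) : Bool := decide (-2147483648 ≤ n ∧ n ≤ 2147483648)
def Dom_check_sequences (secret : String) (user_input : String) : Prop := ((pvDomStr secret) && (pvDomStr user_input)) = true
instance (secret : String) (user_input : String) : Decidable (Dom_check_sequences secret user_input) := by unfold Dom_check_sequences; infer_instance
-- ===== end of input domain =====

-- B replaces A's slice comparisons and O(n*m) loop-invariant nested loop by one
-- common-prefix scan plus O(1) arithmetic classification (objective: faster).

-- ===== PORT A =====
-- A, line for line: the nested 'for i/for j' loop (whose body ignores i and j) is ported as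
-- nested 'any' over the same ranges, which models the early 'return 4'.
def check_sequences (secret : String) (user_input : String) : Int :=
  let s := secret.toList
  let u := user_input.toList
  if s = u then 1
  else if PySem.List.slice s none (some 6) = PySem.List.slice u none (some 6) ∧
          PySem.List.pyGet? s (-1) ≠ PySem.List.pyGet? u (-1) then 2
  else if PySem.List.slice s none (some 5) = PySem.List.slice u none (some 5) ∧
          PySem.List.slice s (some 5) none ≠ PySem.List.slice u (some 5) none then 3
  else if (PySem.List.pyRange 0 ((s.length : Int) - 1) 1).any (fun _ =>
            (PySem.List.pyRange 0 ((u.length : Int) - 1) 1).any (fun _ =>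
              (PySem.List.pyGet? s 0 == PySem.List.pyGet? u 0) &&
              (PySem.List.pyGet? s (-1) == PySem.List.pyGet? u (-1)))) then 4
  else 0

-- ===== PORT B =====
-- Source B's while loop computing the common-prefix length, as the obvious structural recursion
def pvCpl : List Char → List Char → Nat
  | a :: s, b :: u => if a = b then pvCpl s u + 1 else 0
  | _, _ => 0

-- B: one common-prefix scan, then arithmetic classification
def check_sequences_alt (secret : String) (user_input : String) : Int :=
  let s := secret.toList
  let u := user_input.toList
  let n := s.length
  let m := u.length
  let p := pvCpl s u
  if p = n ∧ p = m then 1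
  else
    let ends_match : Bool :=
      if 0 < n ∧ 0 < m then decide (PySem.List.pyGet? s (-1) = PySem.List.pyGet? u (-1))
      else false
    if min n 6 = min m 6 ∧ min n 6 ≤ p ∧ ends_match = false then 2
    else if min n 5 = min m 5 ∧ min n 5 ≤ p then 3
    else if 2 ≤ n ∧ 2 ≤ m ∧ 1 ≤ p ∧ ends_match = true then 4
    else 0

-- ===== PRECONDITION & SPEC =====
def Spec_check_sequences (secret : String) (user_input : String) (out : Int) : Prop := out = check_sequences_alt secret user_input
instance (secret : String) (user_input : String) (out : Int) : Decidable (Spec_check_sequences secret user_input out) := by unfold Spec_check_sequences; infer_instance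

-- ===== CLAIM (what is proved, stated in full; the proofs are below) =====
def Claim_equal_check_sequences : Prop := ∀ (secret : String) (user_input : String), Dom_check_sequences secret user_input → Spec_check_sequences secret user_input (check_sequences secret user_input)

-- ===== LEMMAS AND PROOFS =====

-- two lists are equal iff their common prefix exhausts both
lemma eq_iff_pvCpl (s u : List Char) :
    s = u ↔ (pvCpl s u = s.length ∧ pvCpl s u = u.length) := by
  induction s generalizing u with
  | nil => cases u <;> simp [pvCpl]
  | cons a s ih =>
    cases u with
    | nil => simp [pvCpl]
    | cons b u =>
      simp only [pvCpl, List.length_cons, List.cons.injEq]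
      split_ifs with h
      · constructor
        · rintro ⟨-, h2⟩
          have := (ih u).mp h2
          omega
        · rintro ⟨e1, e2⟩
          exact ⟨h, (ih u).mpr ⟨by omega, by omega⟩⟩
      · constructor
        · rintro ⟨e1, -⟩; exact absurd e1 h
        · rintro ⟨e1, -⟩; exact e1.elim

-- take-k equality characterized by lengths and the common-prefix length
lemma take_eq_iff (s u : List Char) (k : Nat) :
    (s.take k = u.take k) ↔ (min s.length k = min u.length k ∧ min s.length k ≤ pvCpl s u) := by
  induction s generalizing u k with
  | nil =>
    cases u with
    | nil => simp
    | cons b u =>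
      cases k with
      | zero => simp
      | succ k =>
        simp only [List.take_nil, List.take_succ_cons, List.length_nil, List.length_cons, pvCpl]
        constructor
        · intro h; exact absurd h (by simp)
        · rintro ⟨e1, -⟩; omega
  | cons a s ih =>
    cases u with
    | nil =>
      cases k with
      | zero => simp
      | succ k =>
        simp only [List.take_nil, List.take_succ_cons, List.length_nil, List.length_cons, pvCpl]
        constructor
        · intro h; exact absurd h (by simp)
        · rintro ⟨e1, -⟩; omega
    | cons b u =>
      cases k with
      | zero => simp
      | succ k =>
        simp only [List.take_succ_cons, List.cons.injEq, List.length_cons, pvCpl]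
        split_ifs with h
        · rw [ih u k]
          constructor
          · rintro ⟨-, e1, e2⟩; exact ⟨by omega, by omega⟩
          · rintro ⟨e1, e2⟩; exact ⟨h, by omega, by omega⟩
        · constructor
          · rintro ⟨e1, -⟩; exact absurd e1 h
          · rintro ⟨e1, e2⟩; omega

-- if the first five characters agree and the rest agree, the lists are equal
lemma eq_of_take_drop_five (s u : List Char)
    (h1 : s.take 5 = u.take 5) (h2 : s.drop 5 = u.drop 5) : s = u := by
  rw [← List.take_append_drop 5 s, ← List.take_append_drop 5 u, h1, h2]

-- 'any' of a constant body over a list holds iff the list is nonempty and the body holds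
lemma any_const_eq {α : Type} (l : List α) (c : Bool) :
    l.any (fun _ => c) = (!l.isEmpty && c) := by
  induction l with
  | nil => rfl
  | cons x t ih => cases c <;> simp_all

-- 'range(len(l)-1)' is nonempty iff the list has at least two elements
lemma range_pred_len_nonempty (l : List Char) :
    (!(PySem.List.pyRange 0 ((l.length : Int) - 1) 1).isEmpty) = decide (2 ≤ l.length) := by
  by_cases h : 2 ≤ l.length
  · rw [PySem.List.pyRange_one_cons (by omega : (0 : Int) < (l.length : Int) - 1)]
    simp [h]
  · rw [PySem.List.pyRange_one_eq_nil (by omega : (l.length : Int) - 1 ≤ 0)]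
    simp [h]

-- first characters equal iff the common prefix is nonempty
lemma head_eq_iff_pvCpl (a b : Char) (s u : List Char) :
    (a = b) ↔ 1 ≤ pvCpl (a :: s) (b :: u) := by
  simp only [pvCpl]; split_ifs with h <;> simp [h]

-- ===== VERDICT (by name: the statement is the Claim_ definition above) =====
theorem check_sequences_spec : Claim_equal_check_sequences := by
  intro secret user_input _
  unfold Spec_check_sequences check_sequences check_sequences_alt
  set s := secret.toList with hs
  set u := user_input.toList with hu
  clear_value s u
  by_cases h1 : s = u
  · rw [if_pos h1, if_pos ((eq_iff_pvCpl s u).mp h1)]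
  · rw [if_neg h1, if_neg (fun hc => h1 ((eq_iff_pvCpl s u).mpr hc))]
    -- the take-k equalities, rephrased via pvCpl
    have hslice6 : (PySem.List.slice s none (some 6) = PySem.List.slice u none (some 6)) ↔
        (min s.length 6 = min u.length 6 ∧ min s.length 6 ≤ pvCpl s u) := by
      rw [PySem.List.slice_to s (by norm_num), PySem.List.slice_to u (by norm_num)]
      simpa using take_eq_iff s u 6
    have hslice5 : (PySem.List.slice s none (some 5) = PySem.List.slice u none (some 5)) ↔
        (min s.length 5 = min u.length 5 ∧ min s.length 5 ≤ pvCpl s u) := by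
      rw [PySem.List.slice_to s (by norm_num), PySem.List.slice_to u (by norm_num)]
      simpa using take_eq_iff s u 5
    -- under the take-k equality (k ≥ 1) and s ≠ u, both lists are nonempty
    have hne : ∀ k : Nat, 1 ≤ k → min s.length k = min u.length k → s ≠ [] ∧ u ≠ [] := by
      intro k hk hm
      refine ⟨fun hnil => h1 ?_, fun hnil => h1 ?_⟩
      · have h0 : s.length = 0 := by rw [hnil]; rfl
        have h0u : u.length = 0 := by omega
        rw [hnil, List.length_eq_zero_iff.mp h0u]
      · have h0 : u.length = 0 := by rw [hnil]; rfl
        have h0s : s.length = 0 := by omega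
        rw [hnil, List.length_eq_zero_iff.mp h0s]
    by_cases h2 : PySem.List.slice s none (some 6) = PySem.List.slice u none (some 6) ∧
        PySem.List.pyGet? s (-1) ≠ PySem.List.pyGet? u (-1)
    · rw [if_pos h2]
      obtain ⟨h2a, h2b⟩ := h2
      have hmm := (hslice6.mp h2a)
      obtain ⟨hsn, hun⟩ := hne 6 (by norm_num) hmm.1
      rw [if_pos]
      refine ⟨hmm.1, hmm.2, ?_⟩
      rw [if_pos ⟨List.length_pos_iff.mpr hsn, List.length_pos_iff.mpr hun⟩]
      simpa using h2b
    · rw [if_neg h2]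
      have hB2 : ¬ (min s.length 6 = min u.length 6 ∧ min s.length 6 ≤ pvCpl s u ∧
          (if 0 < s.length ∧ 0 < u.length then
            decide (PySem.List.pyGet? s (-1) = PySem.List.pyGet? u (-1)) else false) = false) := by
        rintro ⟨hb1, hb2, hb3⟩
        obtain ⟨hsn, hun⟩ := hne 6 (by norm_num) hb1
        rw [if_pos ⟨List.length_pos_iff.mpr hsn, List.length_pos_iff.mpr hun⟩] at hb3
        exact h2 ⟨hslice6.mpr ⟨hb1, hb2⟩, by simpa using hb3⟩
      rw [if_neg hB2]
      by_cases h3 : PySem.List.slice s none (some 5) = PySem.List.slice u none (some 5)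
      · -- A's extra tail condition in the return-3 branch follows from s ≠ u
        have hsuf : PySem.List.slice s (some 5) none ≠ PySem.List.slice u (some 5) none := by
          intro hd
          apply h1
          apply eq_of_take_drop_five
          · have h3' := h3
            rw [PySem.List.slice_to s (by norm_num), PySem.List.slice_to u (by norm_num)] at h3'
            simpa using h3'
          · rw [PySem.List.slice_from s (by norm_num), PySem.List.slice_from u (by norm_num)] at hd
            simpa using hd
        rw [if_pos ⟨h3, hsuf⟩, if_pos (hslice5.mp h3)]
      · rw [if_neg (fun hc => h3 hc.1), if_neg (fun hc => h3 (hslice5.mpr hc))]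
        -- the loop body is constant: 'any' collapses to the O(1) condition of B
        by_cases h4 : 2 ≤ s.length ∧ 2 ≤ u.length ∧
            PySem.List.pyGet? s 0 = PySem.List.pyGet? u 0 ∧
            PySem.List.pyGet? s (-1) = PySem.List.pyGet? u (-1)
        · obtain ⟨hs2, hu2, hh, hl⟩ := h4
          rw [if_pos, if_pos]
          · refine ⟨hs2, hu2, ?_, ?_⟩
            · -- first chars equal ⇒ 1 ≤ pvCpl
              obtain ⟨a, s', rfl⟩ := List.exists_cons_of_ne_nil
                (by intro h; rw [h] at hs2; simp at hs2 : s ≠ [])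
              obtain ⟨b, u', rfl⟩ := List.exists_cons_of_ne_nil
                (by intro h; rw [h] at hu2; simp at hu2 : u ≠ [])
              have hab : a = b := by
                simpa [PySem.List.pyGet?, PySem.List.pyIdx?] using hh
              exact (head_eq_iff_pvCpl a b s' u').mp hab
            · rw [if_pos ⟨by omega, by omega⟩]; simpa using hl
          · rw [any_const_eq, any_const_eq, range_pred_len_nonempty, range_pred_len_nonempty]
            simp [hs2, hu2, hh, hl]
        · rw [if_neg, if_neg]
          · rintro ⟨hs2, hu2, hp, hl⟩
            rw [if_pos ⟨by omega, by omega⟩] at hl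
            apply h4
            refine ⟨hs2, hu2, ?_, by simpa using hl⟩
            obtain ⟨a, s', rfl⟩ := List.exists_cons_of_ne_nil
              (by intro h; rw [h] at hs2; simp at hs2 : s ≠ [])
            obtain ⟨b, u', rfl⟩ := List.exists_cons_of_ne_nil
              (by intro h; rw [h] at hu2; simp at hu2 : u ≠ [])
            have hab : a = b := (head_eq_iff_pvCpl a b s' u').mpr hp
            simp [PySem.List.pyGet?, PySem.List.pyIdx?, hab]
          · rw [any_const_eq, any_const_eq, range_pred_len_nonempty, range_pred_len_nonempty]
            intro hc
            simp only [Bool.and_eq_true, decide_eq_true_eq, beq_iff_eq] at hc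
            exact h4 (by tauto)
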